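-- pv_equiv track=rewrite | github.com/nathanaelcheramlak/Simple-Python-Projects | Guess-Game/utils/InputValidation.py | number_checker
-- ===== SOURCE A (Python) =====
-- def number_checker(guess):
--     num_set = {'1', '2', '3', '4', '5', '6', '7', '8', '9', '0'}
--     list_true = []
--     list_false = []
--     for i in guess:
--         if i in num_set:
--             list_true.append(i)
--         else:
--             list_false.append(i)
--     if len(list_false) == 0:
--         check = True
--     else:
--         check = False
--     return check
-- ===== SOURCE B (Python) =====
-- def number_checker(guess):
--     return guess.strip('0123456789') == ''
-- ===== Notes on version B (the rewrite author's own statement) =====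
-- stated objective: simpler
-- what changed: Instead of partitioning characters into two accumulator lists and testing the failure list's length, B strips the literal digit characters from both ends of the string and tests whether anything remains: the string is all digits iff stripping digits leaves the empty string.
import Mathlib
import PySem

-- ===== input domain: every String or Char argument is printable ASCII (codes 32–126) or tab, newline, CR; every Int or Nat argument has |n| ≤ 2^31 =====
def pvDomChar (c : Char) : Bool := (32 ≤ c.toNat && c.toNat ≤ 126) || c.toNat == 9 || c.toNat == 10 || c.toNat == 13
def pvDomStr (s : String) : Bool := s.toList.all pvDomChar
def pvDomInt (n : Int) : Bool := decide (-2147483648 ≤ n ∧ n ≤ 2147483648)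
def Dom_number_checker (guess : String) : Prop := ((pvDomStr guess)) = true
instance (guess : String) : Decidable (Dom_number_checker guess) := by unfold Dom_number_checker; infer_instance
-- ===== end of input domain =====

-- ===== PORT A =====
-- B strips the digit characters from both ends and tests that nothing is left (simpler).
-- Literal port of A: partition characters into list_true/list_false, then test len(list_false) == 0.
def number_checker (guess : String) : Bool :=
  let num_set : PySem.Set Char :=
    PySem.Set.ofList ['1','2','3','4','5','6','7','8','9','0']
  let p := guess.toList.foldl
    (fun (acc : List Char × List Char) i =>
      if PySem.Set.contains num_set i then (acc.1 ++ [i], acc.2)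
      else (acc.1, acc.2 ++ [i]))
    ([], [])
  if p.2.length = 0 then true else false

-- ===== PORT B =====
-- Literal port of B: guess.strip('0123456789') == ''.
def number_checker_alt (guess : String) : Bool :=
  PySem.Str.stripChars guess "0123456789" == ""

-- ===== PRECONDITION & SPEC =====
def Spec_number_checker (guess : String) (out : Bool) : Prop := out = number_checker_alt guess
instance (guess : String) (out : Bool) : Decidable (Spec_number_checker guess out) := by unfold Spec_number_checker; infer_instance

-- ===== CLAIM (what is proved, stated in full; the proofs are below) =====
def Claim_equal_number_checker : Prop := ∀ (guess : String), Dom_number_checker guess → Spec_number_checker guess (number_checker guess)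

-- ===== LEMMAS AND PROOFS =====

-- digits as a plain list, for stating the common characterisation
def pvDigits : List Char := ['1','2','3','4','5','6','7','8','9','0']

-- the second accumulator of A's loop collects exactly the non-matching characters
theorem numA_loop (p : Char → Bool) (l t f : List Char) :
    (l.foldl
      (fun (acc : List Char × List Char) i =>
        if p i then (acc.1 ++ [i], acc.2) else (acc.1, acc.2 ++ [i]))
      (t, f)).2 = f ++ l.filter (fun c => !p c) := by
  induction l generalizing t f with
  | nil => simp
  | cons c l ih =>
    by_cases h : p c = true
    · simp [List.foldl, h, ih]
    · simp [List.foldl, h, ih]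

-- len(list_false)==0 iff every character passes the test
theorem filter_len_zero_iff (p : Char → Bool) (l : List Char) :
    ((l.filter (fun c => !p c)).length = 0) ↔ (l.all p = true) := by
  rw [List.length_eq_zero_iff, List.filter_eq_nil_iff, List.all_eq_true]
  simp

-- A returns True exactly when every character is a digit
theorem number_checker_eq_all (guess : String) :
    number_checker guess
      = guess.toList.all (fun c => PySem.Set.contains (PySem.Set.ofList pvDigits) c) := by
  unfold number_checker
  simp only [numA_loop, List.nil_append]
  split_ifs with h
  · exact ((filter_len_zero_iff _ _).mp h).symm
  · cases hall : guess.toList.all (fun c => PySem.Set.contains (PySem.Set.ofList pvDigits) c)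
    · rfl
    · exact absurd ((filter_len_zero_iff _ _).mpr hall) h

-- stripping leaves nothing iff every character is stripped
theorem stripChars_eq_nil_iff (cs chars : List Char) :
    PySem.Chars.stripChars cs chars = [] ↔ ∀ c ∈ cs, chars.contains c = true := by
  unfold PySem.Chars.stripChars
  constructor
  · intro h c hc
    have h1 : List.dropWhile (fun c => chars.contains c)
        (List.dropWhile (fun c => chars.contains c) cs).reverse = [] := by
      simpa using h
    have h2 := List.dropWhile_eq_nil_iff.mp h1
    rcases (List.takeWhile_append_dropWhile (p := fun c => chars.contains c) (l := cs)) with _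
    have : c ∈ List.takeWhile (fun c => chars.contains c) cs ∨
           c ∈ List.dropWhile (fun c => chars.contains c) cs := by
      have := List.takeWhile_append_dropWhile (p := fun c => chars.contains c) (l := cs)
      rw [← this] at hc
      exact List.mem_append.mp hc
    rcases this with h' | h'
    · exact List.mem_takeWhile_imp h'
    · exact h2 c (List.mem_reverse.mpr h')
  · intro h
    have h1 : List.dropWhile (fun c => chars.contains c) cs = [] :=
      List.dropWhile_eq_nil_iff.mpr (fun c hc => by simpa using h c hc)
    show (List.dropWhile (fun c => chars.contains c)
        (List.dropWhile (fun c => chars.contains c) cs).reverse).reverse = []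
    rw [h1]
    rfl
-- membership in the Python digit string equals membership in pvDigits
theorem mem_digits_iff (c : Char) : c ∈ "0123456789".toList ↔ c ∈ pvDigits := by
  have h : "0123456789".toList = ['0','1','2','3','4','5','6','7','8','9'] := rfl
  rw [h]
  simp [pvDigits]
  tauto

-- B returns True exactly when every character is a digit
theorem number_checker_alt_eq_all (guess : String) :
    number_checker_alt guess
      = guess.toList.all (fun c => PySem.Set.contains (PySem.Set.ofList pvDigits) c) := by
  unfold number_checker_alt
  rw [Bool.eq_iff_iff]
  have hempty : (PySem.Str.stripChars guess "0123456789" == "") = true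
      ↔ (PySem.Str.stripChars guess "0123456789").toList = [] := by
    rw [beq_iff_eq]
    constructor
    · intro h; simp [h]
    · intro h
      have h2 := congrArg String.ofList h
      rwa [String.ofList_toList] at h2
  rw [hempty, PySem.Str.toList_stripChars, stripChars_eq_nil_iff]
  simp only [List.all_eq_true, PySem.Set.contains, List.contains_iff_mem, PySem.Set.mem_ofList]
  constructor
  · intro h c hc
    exact (mem_digits_iff c).mp (by simpa using h c hc)
  · intro h c hc
    simpa using (mem_digits_iff c).mpr (h c hc)

-- ===== VERDICT (by name: the statement is the Claim_ definition above) =====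
theorem number_checker_spec : Claim_equal_number_checker := by
  intro guess _
  unfold Spec_number_checker
  show number_checker guess = number_checker_alt guess
  rw [number_checker_eq_all, number_checker_alt_eq_all]
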